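-- pv_equiv track=rewrite | github.com/pnheinsohn/IIC2233-PrograAvanzada | pnheinsohn-iic2233-2017-2/Tareas/T03/Consultas.py | go_adn_comparison
-- ===== SOURCE A (Python) =====
-- def go_adn_comparison(person_char, other_person_char, number):
--     if len(person_char) == 0 or len(other_person_char) == 0:
--         return number
--     if person_char[0] in other_person_char:
--         other_person_char.pop(other_person_char.index(person_char[0]))
--         person_char.pop(0)
--         number += 1
--         return go_adn_comparison(person_char, other_person_char, number)
--     return number
-- ===== SOURCE B (Python) =====
-- def go_adn_comparison(person_char, other_person_char, number):
--     # Counter-based: O(n+m) instead of A's O(n*m); does NOT mutate the arguments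
--     # (equivalence is about the return value only).
--     counts = {}
--     for c in other_person_char:
--         counts[c] = counts.get(c, 0) + 1
--     for c in person_char:
--         if counts.get(c, 0) == 0:
--             break
--         counts[c] = counts[c] - 1
--         number += 1
--     return number
-- ===== Notes on version B (the rewrite author's own statement) =====
-- stated objective: faster
-- what changed: Replaces the list-mutating tail recursion (membership test + index/pop scans of the other list per step) with a single-pass hash multiset: build a count dict of other_person_char once, then walk person_char decrementing counts until a zero count; B does not mutate the arguments (return value is identical).
import Mathlib
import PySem

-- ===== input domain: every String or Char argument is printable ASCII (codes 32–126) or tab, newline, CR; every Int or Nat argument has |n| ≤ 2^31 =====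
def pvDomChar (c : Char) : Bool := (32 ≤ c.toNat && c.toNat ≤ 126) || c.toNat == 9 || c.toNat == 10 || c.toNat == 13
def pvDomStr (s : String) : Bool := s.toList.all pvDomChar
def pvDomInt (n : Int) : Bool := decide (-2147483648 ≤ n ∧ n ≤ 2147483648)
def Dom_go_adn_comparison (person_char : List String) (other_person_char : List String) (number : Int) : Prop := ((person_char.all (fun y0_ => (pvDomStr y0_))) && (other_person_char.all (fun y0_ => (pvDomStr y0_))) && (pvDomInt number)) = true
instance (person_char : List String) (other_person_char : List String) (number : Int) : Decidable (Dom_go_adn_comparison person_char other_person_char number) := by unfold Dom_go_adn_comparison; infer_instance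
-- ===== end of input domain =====

-- B replaces A's list-mutating tail recursion by a one-pass count-dict scan (O(n+m) vs O(n*m)).
-- A mutates both list arguments in place; B does not — the equivalence proved is about the RETURN value only.

-- ===== PORT A =====
-- A: if either list is empty return number; if head matchable, remove its first
-- occurrence (pop(index(...)) = List.erase) from the other list, drop the head, recurse.
def go_adn_comparison (person_char : List String) (other_person_char : List String) (number : Int) : Int :=
  match person_char with
  | [] => number
  | c :: rest =>
    if other_person_char.length = 0 then number
    else if other_person_char.contains c then
      go_adn_comparison rest (other_person_char.erase c) (number + 1)
    else number

-- ===== PORT B =====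
-- counts[c] = counts.get(c, 0) + 1 over other_person_char
def pvCounts (other_person_char : List String) : PySem.Dict String Int :=
  other_person_char.foldl (fun d c => d.insert c (d.getD c 0 + 1)) PySem.Dict.empty

-- the second loop of Source B: break on a zero count, else decrement and count up
def pvBLoop (person_char : List String) (counts : PySem.Dict String Int) (number : Int) : Int :=
  match person_char with
  | [] => number
  | c :: rest =>
    if counts.getD c 0 == 0 then number
    else pvBLoop rest (counts.insert c (counts.getD c 0 - 1)) (number + 1)

def go_adn_comparison_alt (person_char : List String) (other_person_char : List String) (number : Int) : Int :=
  pvBLoop person_char (pvCounts other_person_char) number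

-- ===== PRECONDITION & SPEC =====
def Spec_go_adn_comparison (person_char : List String) (other_person_char : List String) (number : Int) (out : Int) : Prop := out = go_adn_comparison_alt person_char other_person_char number
instance (person_char : List String) (other_person_char : List String) (number : Int) (out : Int) : Decidable (Spec_go_adn_comparison person_char other_person_char number out) := by unfold Spec_go_adn_comparison; infer_instance

-- ===== CLAIM (what is proved, stated in full; the proofs are below) =====
def Claim_equal_go_adn_comparison : Prop := ∀ (person_char : List String) (other_person_char : List String) (number : Int), Dom_go_adn_comparison person_char other_person_char number → Spec_go_adn_comparison person_char other_person_char number (go_adn_comparison person_char other_person_char number)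

-- ===== LEMMAS AND PROOFS =====

-- Invariant: the dict represents the multiset of the remaining other list.
theorem pvBLoop_eq (person_char : List String) :
    ∀ (oc : List String) (d : PySem.Dict String Int) (n : Int),
      (∀ k, d.getD k 0 = (oc.count k : Int)) →
      pvBLoop person_char d n = go_adn_comparison person_char oc n := by
  induction person_char with
  | nil => intro oc d n _; simp [pvBLoop, go_adn_comparison]
  | cons c rest ih =>
    intro oc d n hrep
    have hc : d.getD c 0 = (oc.count c : Int) := hrep c
    by_cases hmem : c ∈ oc
    · have hcount : 0 < oc.count c := List.count_pos_iff.mpr hmem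
      have hne : ¬ (d.getD c 0 == 0) = true := by
        simp [hc]; omega
      have hlen : ¬ oc.length = 0 := by
        intro h; rw [List.length_eq_zero_iff.mp h] at hmem; simp at hmem
      have hcontains : oc.contains c := by simpa using hmem
      rw [pvBLoop, go_adn_comparison]
      simp only [hne, if_false, hlen, hcontains, if_true]
      apply ih
      intro k
      rw [PySem.Dict.getD_insert]
      by_cases hk : k = c
      · subst hk
        rw [if_pos rfl, hc, List.count_erase_self]
        omega
      · rw [if_neg hk, hrep k, List.count_erase_of_ne hk]
    · have hz : oc.count c = 0 := List.count_eq_zero.mpr hmem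
      have heq : (d.getD c 0 == 0) = true := by simp [hc, hz]
      rw [pvBLoop, go_adn_comparison]
      simp only [heq, if_true]
      by_cases hlen : oc.length = 0
      · simp [hlen]
      · simp [hlen, hmem]

-- ===== VERDICT (by name: the statement is the Claim_ definition above) =====
theorem go_adn_comparison_spec : Claim_equal_go_adn_comparison := by
  intro pc oc n _
  unfold Spec_go_adn_comparison go_adn_comparison_alt
  refine (pvBLoop_eq pc oc (pvCounts oc) n ?_).symm
  intro k
  unfold pvCounts
  rw [PySem.Dict.getD_foldl_insert_add_one, PySem.Dict.getD_empty]
  simp
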